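-- pv_equiv track=rewrite | github.com/BowlOfRed/cardodds | generate_hands.py | count_sets
-- ===== SOURCE A (Python) =====
-- def count_sets(hand):
--     # Given a hand of cards, indicate the number of "sets" of each rank
--     # Output count of each set with more than 1 member
--     ranks = sorted([x[0] for x in hand])
--     large_sets = []
--     set_size = 0
--     last_rank = -1
--     for rank in ranks:
--         if rank != last_rank:
--             if set_size > 1:
--                 large_sets.append(set_size)
--             set_size = 1
--             last_rank = rank
--         else:
--             set_size += 1
--     if set_size > 1:
--         large_sets.append(set_size)
--     return sorted(large_sets)
-- ===== SOURCE B (Python) =====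
-- def count_sets(hand):
--     # One-pass frequency table over the ranks; no sort of the ranks,
--     # no run-detection state. Sort only the qualifying group sizes.
--     counts = {}
--     for card in hand:
--         counts[card[0]] = counts.get(card[0], 0) + 1
--     return sorted(c for c in counts.values() if c > 1)
-- ===== Notes on version B (the rewrite author's own statement) =====
-- stated objective: idiomatic
-- what changed: Replaces sort-then-scan run detection (sorted ranks + last_rank/set_size state machine) with a one-pass hash frequency table whose values > 1 are sorted; the initial sort of the ranks and the adjacency-run loop disappear.
import Mathlib
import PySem

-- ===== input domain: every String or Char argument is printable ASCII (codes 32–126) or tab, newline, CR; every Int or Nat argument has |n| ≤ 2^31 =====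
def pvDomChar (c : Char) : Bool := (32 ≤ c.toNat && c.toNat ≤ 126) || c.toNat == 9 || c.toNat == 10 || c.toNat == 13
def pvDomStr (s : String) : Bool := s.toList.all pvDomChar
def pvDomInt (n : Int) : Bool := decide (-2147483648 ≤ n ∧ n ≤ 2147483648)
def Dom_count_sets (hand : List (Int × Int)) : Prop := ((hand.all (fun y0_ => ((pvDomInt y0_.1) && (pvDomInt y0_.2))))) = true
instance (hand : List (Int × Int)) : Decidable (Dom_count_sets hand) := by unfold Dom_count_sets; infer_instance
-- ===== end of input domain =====

-- B replaces A's sort-then-run-detection with a one-pass frequency dict (idiomatic; same results).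

-- ===== PORT A =====
-- the body of A's for-loop; state: (large_sets, set_size, last_rank)
def pvStepA (st : List Int × Int × Int) (rank : Int) : List Int × Int × Int :=
  if rank ≠ st.2.2 then
    ((if st.2.1 > 1 then st.1 ++ [st.2.1] else st.1), 1, rank)
  else
    (st.1, st.2.1 + 1, st.2.2)

-- the trailing 'if set_size > 1: large_sets.append(set_size)'
def pvFinishA (st : List Int × Int × Int) : List Int :=
  if st.2.1 > 1 then st.1 ++ [st.2.1] else st.1

def count_sets (hand : List (Int × Int)) : List Int :=
  let ranks := PySem.List.sorted (hand.map (fun x => x.1)) (fun r => r) false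
  let st := ranks.foldl pvStepA ([], 0, -1)
  PySem.List.sorted (pvFinishA st) (fun r => r) false

-- ===== PORT B =====
def count_sets_alt (hand : List (Int × Int)) : List Int :=
  let counts := hand.foldl
    (fun (d : PySem.Dict Int Int) card => d.insert card.1 (d.getD card.1 0 + 1))
    PySem.Dict.empty
  PySem.List.sorted (counts.values.filter (fun c => decide (1 < c))) (fun c => c) false

-- ===== PRECONDITION & SPEC =====
def Spec_count_sets (hand : List (Int × Int)) (out : List Int) : Prop := out = count_sets_alt hand
instance (hand : List (Int × Int)) (out : List Int) : Decidable (Spec_count_sets hand out) := by unfold Spec_count_sets; infer_instance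

-- ===== CLAIM (what is proved, stated in full; the proofs are below) =====
def Claim_equal_count_sets : Prop := ∀ (hand : List (Int × Int)), Dom_count_sets hand → Spec_count_sets hand (count_sets hand)

-- ===== LEMMAS AND PROOFS =====

-- A's loop with its accumulator externalised
def pvRun (k last : Int) : List Int → List Int
  | [] => if 1 < k then [k] else []
  | r :: t => if r = last then pvRun (k + 1) last t
              else (if 1 < k then [k] else []) ++ pvRun 1 r t

-- group sizes (> 1) of a sorted list, leftmost group first
def pvGroups (s : List Int) : List Int :=
  match s with
  | [] => []
  | x :: t =>
    (if 1 < 1 + (t.count x : Int) then [1 + (t.count x : Int)] else []) ++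
      pvGroups (t.filter (· ≠ x))
termination_by s.length
decreasing_by
  simp only [List.length_unattach, List.length_cons]
  exact Nat.lt_succ_of_le (le_trans (List.length_filter_le _ _) (by simp))

-- the filtered per-distinct-value counts of a list (B's pre-sort list, abstractly)
def pvSetCounts (l : List Int) : List Int :=
  ((PySem.Set.ofList l).map (fun v => (l.count v : Int))).filter (fun c => decide (1 < c))

theorem pvFoldl_eq_run (s : List Int) (acc : List Int) (k last : Int) :
    pvFinishA (s.foldl pvStepA (acc, k, last)) = acc ++ pvRun k last s := by
  induction s generalizing acc k last with
  | nil =>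
    simp only [List.foldl_nil, pvFinishA, pvRun]
    split_ifs <;> simp
  | cons r t ih =>
    rw [List.foldl_cons, pvRun]
    by_cases h : r = last
    · have : pvStepA (acc, k, last) r = (acc, k + 1, last) := by
        simp [pvStepA, h]
      rw [this, if_pos h, ih]
    · by_cases hk : 1 < k
      · have : pvStepA (acc, k, last) r = (acc ++ [k], 1, r) := by
          simp [pvStepA, h, hk]
        rw [this, if_neg h, ih]; simp [hk]
      · have : pvStepA (acc, k, last) r = (acc, 1, r) := by
          simp [pvStepA, h]; omega
        rw [this, if_neg h, ih]; simp [hk]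

theorem pvRun_sorted (s : List Int) (hs : s.Pairwise (· ≤ ·)) (r k : Int)
    (hk : 1 ≤ k) (hr : ∀ x ∈ s, r ≤ x) :
    pvRun k r s = (if 1 < k + (s.count r : Int) then [k + (s.count r : Int)] else []) ++
      pvGroups (s.filter (· ≠ r)) := by
  induction s generalizing r k with
  | nil => simp [pvRun, pvGroups.eq_1]
  | cons x t ih =>
    rcases List.pairwise_cons.mp hs with ⟨hx, ht⟩
    by_cases h : x = r
    · subst h
      rw [pvRun, if_pos rfl, ih ht x (k + 1) (by omega) hx]
      have hc : ((x :: t).count x : Int) = (t.count x : Int) + 1 := by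
        rw [List.count_cons_self]; push_cast; ring
      have hf : (x :: t).filter (· ≠ x) = t.filter (· ≠ x) := by simp
      rw [hc, hf, show k + ((t.count x : Int) + 1) = k + 1 + (t.count x : Int) from by ring]
    · have hrx : r < x := lt_of_le_of_ne (hr x List.mem_cons_self) (Ne.symm h)
      have hnot : ∀ y ∈ x :: t, y ≠ r := by
        intro y hy
        rcases List.mem_cons.mp hy with rfl | hyt
        · omega
        · have := hx y hyt; omega
      have hcount : (((x :: t).count r : Nat) : Int) = 0 := by
        rw [List.count_eq_zero.mpr (fun hm => hnot r hm rfl)]; rfl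
      have hfilter : (x :: t).filter (· ≠ r) = x :: t := by
        rw [List.filter_eq_self]
        intro y hy; simpa using hnot y hy
      rw [pvRun, if_neg h, ih ht x 1 le_rfl hx, hcount, hfilter, pvGroups.eq_2]
      simp

-- A's loop over a sorted list computes exactly its group sizes > 1
theorem pvLoop_groups (s : List Int) (hs : s.Pairwise (· ≤ ·)) :
    pvFinishA (s.foldl pvStepA ([], 0, -1)) = pvGroups s := by
  rw [pvFoldl_eq_run, List.nil_append]
  cases s with
  | nil => simp [pvRun, pvGroups.eq_1]
  | cons x t =>
    rcases List.pairwise_cons.mp hs with ⟨hx, ht⟩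
    have hstep : pvRun 0 (-1) (x :: t) = pvRun 1 x t := by
      rw [pvRun]
      by_cases h : x = -1
      · rw [if_pos h, h]; norm_num
      · rw [if_neg h]; simp
    rw [hstep, pvRun_sorted t ht x 1 le_rfl hx, pvGroups.eq_2]

-- the distinct elements of x :: t are x followed by the distinct elements of t minus x
theorem pvOfList_cons_perm (x : Int) (t : List Int) :
    (PySem.Set.ofList (x :: t)).Perm (x :: PySem.Set.ofList (t.filter (· ≠ x))) := by
  rw [List.perm_ext_iff_of_nodup (PySem.Set.nodup_ofList _) ?_]
  · intro v
    simp [PySem.Set.mem_ofList, List.mem_filter]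
    by_cases h : v = x <;> simp [h]
  · refine List.nodup_cons.mpr ⟨?_, PySem.Set.nodup_ofList _⟩
    simp [PySem.Set.mem_ofList, List.mem_filter]

-- pvGroups is, up to order, the filtered per-distinct-value counts
theorem pvGroups_perm : ∀ (n : Nat) (l : List Int), l.length ≤ n →
    (pvGroups l).Perm (pvSetCounts l) := by
  intro n
  induction n with
  | zero =>
    intro l hl
    rw [List.length_eq_zero_iff.mp (Nat.le_zero.mp hl)]
    simp [pvGroups.eq_1, pvSetCounts]
  | succ n ih =>
    intro l hl
    cases l with
    | nil => simp [pvGroups.eq_1, pvSetCounts]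
    | cons x t =>
      rw [pvGroups.eq_2, pvSetCounts]
      have htf : (t.filter (· ≠ x)).length ≤ n := by
        have := List.length_filter_le (fun y => decide (y ≠ x)) t
        simp only [List.length_cons, Nat.succ_le_succ_iff] at hl
        omega
      have hperm := (pvOfList_cons_perm x t).map (fun v => (((x :: t).count v : Nat) : Int))
      refine ((List.Perm.append_left _ (ih _ htf)).trans ?_).trans
        ((hperm.filter _).symm)
      -- goal: (if …) ++ pvSetCounts (t.filter (· ≠ x)) ~ filter of map over x :: ofList (t.filter ≠ x)
      rw [pvSetCounts]
      have hmap : (PySem.Set.ofList (t.filter (· ≠ x))).map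
            (fun v => (((t.filter (· ≠ x)).count v : Nat) : Int)) =
          (PySem.Set.ofList (t.filter (· ≠ x))).map
            (fun v => (((x :: t).count v : Nat) : Int)) := by
        refine List.map_congr_left ?_
        intro v hv
        have hvf : v ∈ t.filter (· ≠ x) := (PySem.Set.mem_ofList _ _).mp hv
        have hvx : v ≠ x := by simpa using (List.mem_filter.mp hvf).2
        simp [List.count_filter, hvx, Ne.symm hvx]
      rw [hmap, List.map_cons, List.filter_cons]
      have hcx : (((x :: t).count x : Nat) : Int) = 1 + (t.count x : Int) := by
        rw [List.count_cons_self]; push_cast; ring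
      by_cases h1 : 1 < 1 + (t.count x : Int)
      · have hxt : x ∈ t := by
          rw [← List.count_pos_iff]; omega
        simp [hcx, h1, hxt, add_comm]
      · have hxt : x ∉ t := by
          rw [← List.count_eq_zero]; omega
        simp [hcx, h1, hxt]


-- counts over a permutation agree, so pvSetCounts is permutation-invariant
theorem pvSetCounts_perm_of_perm (l m : List Int) (h : l.Perm m) :
    (pvSetCounts l).Perm (pvSetCounts m) := by
  rw [pvSetCounts, pvSetCounts]
  have hf : (fun v : Int => ((l.count v : Nat) : Int)) =
      (fun v : Int => ((m.count v : Nat) : Int)) := by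
    funext v; rw [h.count_eq]
  have hsets : (PySem.Set.ofList l).Perm (PySem.Set.ofList m) := by
    rw [List.perm_ext_iff_of_nodup (PySem.Set.nodup_ofList _) (PySem.Set.nodup_ofList _)]
    intro v
    rw [PySem.Set.mem_ofList, PySem.Set.mem_ofList]
    exact ⟨fun hv => h.mem_iff.mp hv, fun hv => h.mem_iff.mpr hv⟩
  rw [hf]
  exact (hsets.map _).filter _

theorem count_sets_eq_alt (hand : List (Int × Int)) :
    count_sets hand = count_sets_alt hand := by
  rw [count_sets, count_sets_alt]
  have hvalues : (hand.foldl
      (fun (d : PySem.Dict Int Int) card => d.insert card.1 (d.getD card.1 0 + 1))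
      PySem.Dict.empty).values =
      (PySem.Set.ofList (hand.map (fun x => x.1))).map
        (fun v => (((hand.map (fun x => x.1)).count v : Nat) : Int)) := by
    rw [show (hand.foldl (fun (d : PySem.Dict Int Int) card =>
          d.insert card.1 (d.getD card.1 0 + 1)) PySem.Dict.empty) =
        ((hand.map (fun x => x.1)).foldl
          (fun (d : PySem.Dict Int Int) x => d.insert x (d.getD x 0 + 1)) PySem.Dict.empty)
      from by rw [List.foldl_map]]
    rw [PySem.Dict.foldl_insert_getD_add_one_eq_counter]
    simp only [PySem.Dict.values, PySem.Dict.items_counter, List.map_map]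
    rfl
  simp only [hvalues]
  set ranks0 := hand.map (fun x => x.1) with hranks0
  set s := PySem.List.sorted ranks0 (fun r => r) false with hsdef
  have hs : s.Pairwise (· ≤ ·) := by
    have := PySem.List.sorted_pairwise ranks0 (fun r => r)
    simpa using this
  rw [pvLoop_groups s hs]
  apply PySem.List.sorted_eq_sorted_of_perm _ _ _ (fun a b => id)
  refine (pvGroups_perm s.length s le_rfl).trans ?_
  refine (pvSetCounts_perm_of_perm s ranks0 (PySem.List.sorted_perm ranks0 _ _)).trans ?_
  rw [pvSetCounts]

-- ===== VERDICT (by name: the statement is the Claim_ definition above) =====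
theorem count_sets_spec : Claim_equal_count_sets := by
  intro hand _
  exact count_sets_eq_alt hand
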